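-- pv_equiv track=rewrite | github.com/openstack-archive/ec2-api | ec2api/metadata/api.py | _cut_down_to_version
-- ===== SOURCE A (Python) =====
-- import itertools
--
-- VERSIONS = [
--     '1.0',
--     '2007-01-19',
--     '2007-03-01',
--     '2007-08-29',
--     '2007-10-10',
--     '2007-12-15',
--     '2008-02-01',
--     '2008-09-01',
--     '2009-04-04',
-- ]
--
-- VERSION_DATA = {
--     '1.0': ['ami-id',
--             'ami-launch-index',
--             'ami-manifest-path',
--             'hostname',
--             'instance-id',
--             'local-ipv4',
--             'public-keys',
--             'reservation-id',
--             'security-groups'],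
--     '2007-01-19': ['local-hostname',
--                    'public-hostname',
--                    'public-ipv4'],
--     '2007-03-01': ['product-codes'],
--     '2007-08-29': ['instance-type'],
--     '2007-10-10': ['ancestor-ami-ids',
--                    'ramdisk-id'],
--     '2007-12-15': ['block-device-mapping'],
--     '2008-02-01': ['kernel-id',
--                    'placement'],
--     '2008-09-01': ['instance-action'],
--     '2009-04-04': [],
-- }
--
-- def _cut_down_to_version(metadata, version):
--     version_number = VERSIONS.index(version) + 1
--     if version_number == len(VERSIONS):
--         return metadata
--     return {attr: metadata[attr]
--             for attr in itertools.chain(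
--                 *(VERSION_DATA[ver] for ver in VERSIONS[:version_number]))
--             if attr in metadata}
-- ===== SOURCE B (Python) =====
-- VERSIONS = [
--     '1.0',
--     '2007-01-19',
--     '2007-03-01',
--     '2007-08-29',
--     '2007-10-10',
--     '2007-12-15',
--     '2008-02-01',
--     '2008-09-01',
--     '2009-04-04',
-- ]
--
-- VERSION_DATA = {
--     '1.0': ['ami-id',
--             'ami-launch-index',
--             'ami-manifest-path',
--             'hostname',
--             'instance-id',
--             'local-ipv4',
--             'public-keys',
--             'reservation-id',
--             'security-groups'],
--     '2007-01-19': ['local-hostname',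
--                    'public-hostname',
--                    'public-ipv4'],
--     '2007-03-01': ['product-codes'],
--     '2007-08-29': ['instance-type'],
--     '2007-10-10': ['ancestor-ami-ids',
--                    'ramdisk-id'],
--     '2007-12-15': ['block-device-mapping'],
--     '2008-02-01': ['kernel-id',
--                    'placement'],
--     '2008-09-01': ['instance-action'],
--     '2009-04-04': [],
-- }
--
-- # Precomputed once at import time:
-- #   _CHAIN  : all attributes in the global version-chain order
-- #   _RANK   : attribute -> its position in _CHAIN
-- #   _CUTOFF : version -> how many leading attributes of _CHAIN it allows
-- _CHAIN = []
-- for _ver in VERSIONS: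
--     _CHAIN.extend(VERSION_DATA[_ver])
-- _RANK = {attr: i for i, attr in enumerate(_CHAIN)}
-- _CUTOFF = {}
-- _n = 0
-- for _ver in VERSIONS:
--     _n += len(VERSION_DATA[_ver])
--     _CUTOFF[_ver] = _n
--
--
-- def _cut_down_to_version(metadata, version):
--     # Scan the metadata once, keeping entries whose attribute ranks below the
--     # version's cutoff, then sort the kept entries by rank (the chain order).
--     if version == VERSIONS[-1]:
--         return metadata
--     cutoff = _CUTOFF[version]
--     kept = [item for item in metadata.items()
--             if _RANK.get(item[0], len(_CHAIN)) < cutoff]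
--     kept.sort(key=lambda item: _RANK[item[0]])
--     return dict(kept)
-- ===== Notes on version B (the rewrite author's own statement) =====
-- stated objective: alternative
-- what changed: B inverts the traversal: instead of iterating the chained VERSION_DATA attribute lists and probing the metadata dict per attribute, it scans metadata.items() once, keeps entries whose precomputed rank (position in the flattened attribute chain) is below the version's precomputed cutoff, and sorts the kept entries by rank to restore the chain order.
import Mathlib
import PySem

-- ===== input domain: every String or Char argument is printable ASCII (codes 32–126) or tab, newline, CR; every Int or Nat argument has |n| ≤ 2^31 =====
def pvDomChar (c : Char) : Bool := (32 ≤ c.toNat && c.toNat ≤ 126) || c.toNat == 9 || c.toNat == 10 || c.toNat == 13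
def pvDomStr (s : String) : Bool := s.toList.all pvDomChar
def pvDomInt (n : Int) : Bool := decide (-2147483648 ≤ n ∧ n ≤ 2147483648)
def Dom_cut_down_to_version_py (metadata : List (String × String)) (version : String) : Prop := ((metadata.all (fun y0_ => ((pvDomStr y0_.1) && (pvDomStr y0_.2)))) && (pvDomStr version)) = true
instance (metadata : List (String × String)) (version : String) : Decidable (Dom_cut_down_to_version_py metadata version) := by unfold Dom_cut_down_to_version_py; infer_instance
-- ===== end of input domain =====

-- B scans the metadata once (instead of probing it per allowed attribute), keeping entries whose
-- precomputed rank is below the version's cutoff, then sorts them by rank (objective: alternative).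


-- ===== PORT A =====
def pvVERSIONS : List String :=
  ["1.0", "2007-01-19", "2007-03-01", "2007-08-29", "2007-10-10",
   "2007-12-15", "2008-02-01", "2008-09-01", "2009-04-04"]

def pvVERSION_DATA : PySem.Dict String (List String) := PySem.Dict.mk
  [("1.0", ["ami-id", "ami-launch-index", "ami-manifest-path", "hostname",
            "instance-id", "local-ipv4", "public-keys", "reservation-id",
            "security-groups"]),
   ("2007-01-19", ["local-hostname", "public-hostname", "public-ipv4"]),
   ("2007-03-01", ["product-codes"]),
   ("2007-08-29", ["instance-type"]),
   ("2007-10-10", ["ancestor-ami-ids", "ramdisk-id"]),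
   ("2007-12-15", ["block-device-mapping"]),
   ("2008-02-01", ["kernel-id", "placement"]),
   ("2008-09-01", ["instance-action"]),
   ("2009-04-04", [])]

-- literal port of A: VERSIONS.index(version)+1, early return on the last version,
-- then the dict comprehension over chain(*(VERSION_DATA[ver] for ver in VERSIONS[:version_number]))
def cut_down_to_version_py (metadata : List (String × String)) (version : String) : List (String × String) :=
  match PySem.List.index? pvVERSIONS version with
  | none => []  -- ValueError: version not in VERSIONS; excluded by Pre_
  | some idx =>
    let version_number : Int := (idx : Int) + 1
    if version_number == (pvVERSIONS.length : Int) then metadata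
    else
      let attrs : List String :=
        (PySem.List.slice pvVERSIONS none (some version_number)).flatMap
          (fun ver => (pvVERSION_DATA.get? ver).getD [])
      (attrs.foldl
        (fun (d : PySem.Dict String String) attr =>
          match (PySem.Dict.mk metadata).get? attr with
          | some v => d.insert attr v
          | none => d)
        PySem.Dict.empty).items

-- ===== PORT B =====
-- module-level precomputation from Source B: _CHAIN (all attributes in chain order),
-- _RANK (attribute -> position in _CHAIN), _CUTOFF (version -> allowed prefix length)
def pvCHAIN : List String :=
  pvVERSIONS.foldl (fun acc ver => acc ++ ((pvVERSION_DATA.get? ver).getD [])) []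

def pvRANK : PySem.Dict String Int :=
  (PySem.List.enumerate pvCHAIN 0).foldl (fun d p => d.insert p.2 (p.1 : Int)) PySem.Dict.empty

def pvCUTOFF : PySem.Dict String Int :=
  (pvVERSIONS.foldl
    (fun (p : Int × PySem.Dict String Int) ver =>
      let n := p.1 + ((((pvVERSION_DATA.get? ver).getD []).length : Int))
      (n, p.2.insert ver n))
    (0, PySem.Dict.empty)).2

-- port of Source B's function: one filtering scan over metadata.items(), then sort by rank.
-- (_RANK[item[0]] in the sort key always exists for kept items; ported with getD 0.)
def cut_down_to_version_py_alt (metadata : List (String × String)) (version : String) : List (String × String) :=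
  if version == (PySem.List.pyGet? pvVERSIONS (-1)).getD "" then metadata
  else
    match pvCUTOFF.get? version with
    | none => []  -- KeyError: version not in _CUTOFF; excluded by Pre_
    | some cutoff =>
      let kept := (PySem.Dict.mk metadata).items.filter
        (fun item => decide (pvRANK.getD item.1 (pvCHAIN.length : Int) < cutoff))
      (PySem.Dict.ofList (PySem.List.sorted kept (fun item => pvRANK.getD item.1 0) false)).items

-- ===== PRECONDITION & SPEC =====
-- Pre_: the version must be known (A raises ValueError otherwise), and metadata must have
-- distinct keys: the Python argument is a dict, so association lists with duplicate keys
-- represent no Python input at all.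
def Pre_cut_down_to_version_py (metadata : List (String × String)) (version : String) : Prop :=
  version ∈ pvVERSIONS ∧ (metadata.map Prod.fst).Nodup
instance (metadata : List (String × String)) (version : String) : Decidable (Pre_cut_down_to_version_py metadata version) := by unfold Pre_cut_down_to_version_py; infer_instance

def pvWitness_cut_down_to_version_py : (List (String × String)) × String :=
  ([("hostname", "h1"), ("kernel-id", "k"), ("foo", "x")], "2007-01-19")

def Spec_cut_down_to_version_py (metadata : List (String × String)) (version : String) (out : List (String × String)) : Prop := out = cut_down_to_version_py_alt metadata version
instance (metadata : List (String × String)) (version : String) (out : List (String × String)) : Decidable (Spec_cut_down_to_version_py metadata version out) := by unfold Spec_cut_down_to_version_py; infer_instance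

-- ===== CLAIM (what is proved, stated in full; the proofs are below) =====
def Claim_equal_cut_down_to_version_py : Prop := ∀ (metadata : List (String × String)) (version : String), Dom_cut_down_to_version_py metadata version → Pre_cut_down_to_version_py metadata version → Spec_cut_down_to_version_py metadata version (cut_down_to_version_py metadata version)

-- ===== LEMMAS AND PROOFS =====

lemma pv_keys_rank : pvRANK.keys = pvCHAIN := by decide

lemma pv_rank_notmem (s : String) (h : s ∉ pvCHAIN) :
    pvRANK.getD s (pvCHAIN.length : Int) = (pvCHAIN.length : Int) := by
  rw [PySem.Dict.getD_eq_get?_getD,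
    (PySem.Dict.get?_eq_none_iff_not_mem_keys _ _).2 (pv_keys_rank ▸ h)]
  rfl

lemma pv_pred_iff (L : List String) (c : Int) (hclen : c ≤ (pvCHAIN.length : Int))
    (hchain : ∀ s ∈ pvCHAIN, ((pvRANK.getD s (pvCHAIN.length : Int) < c) ↔ s ∈ L))
    (hsub : ∀ s ∈ L, s ∈ pvCHAIN) (s : String) :
    (pvRANK.getD s (pvCHAIN.length : Int) < c) ↔ s ∈ L := by
  by_cases h : s ∈ pvCHAIN
  · exact hchain s h
  · rw [pv_rank_notmem s h]
    constructor
    · intro hlt; omega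
    · intro hs; exact absurd (hsub s hs) h

-- a disjoint-or filter, permuted: used to peel one metadata entry off the allowed-attribute filter
lemma pv_filter_or_perm (L : List String) (hL : L.Nodup) (k : String) (hk : k ∈ L)
    (p : String → Bool) (hp : p k = false) :
    (L.filter (fun a => a == k || p a)).Perm (k :: L.filter p) := by
  have h1 : L.Perm (k :: L.erase k) := List.perm_cons_erase hk
  have h2 : (L.filter (fun a => a == k || p a)).Perm
      ((k :: L.erase k).filter (fun a => a == k || p a)) := h1.filter _
  have h3 : (k :: L.erase k).filter (fun a => a == k || p a)
      = k :: (L.erase k).filter (fun a => a == k || p a) := by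
    simp
  have h4 : (L.erase k).filter (fun a => a == k || p a) = (L.erase k).filter p := by
    apply List.filter_congr
    intro a ha
    have hne : a ≠ k := ((hL.mem_erase_iff).1 ha).1
    simp [hne]
  have h5 : ((L.erase k).filter p).Perm (L.filter p) := by
    have := (h1.filter p).symm
    simpa [List.filter_cons, hp] using this
  exact (h2.trans (by rw [h3, h4])).trans (h5.cons k)

lemma pv_perm_main (l : List (String × String)) (hl : (l.map Prod.fst).Nodup)
    (L : List String) (hL : L.Nodup) :
    ((L.filter (fun a => (PySem.Dict.mk l).contains a)).map
        (fun a => (a, (PySem.Dict.mk l).getD a ""))).Perm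
      (l.filter (fun item => decide (item.1 ∈ L))) := by
  revert hl
  induction l with
  | nil =>
    intro _
    simp [PySem.Dict.contains_eq_isSome_get?,
      (PySem.Dict.get?_eq_none_iff_not_mem_keys (PySem.Dict.mk ([] : List (String × String))) _).2
        (by simp [PySem.Dict.keys])]
  | cons kv t ih =>
    intro hl
    obtain ⟨k, v⟩ := kv
    have hk_not : k ∉ t.map Prod.fst := by
      simpa using (List.nodup_cons.1 hl).1
    have hl' : (t.map Prod.fst).Nodup := (List.nodup_cons.1 hl).2
    have hcont : ∀ a, (PySem.Dict.mk ((k, v) :: t)).contains a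
        = (a == k || (PySem.Dict.mk t).contains a) := by
      intro a
      by_cases h : k = a
      · subst h; simp [PySem.Dict.contains_eq_isSome_get?, PySem.Dict.get?_mk_cons]
      · simp [PySem.Dict.contains_eq_isSome_get?, PySem.Dict.get?_mk_cons, h, Ne.symm h]
    have hgetD : ∀ a, a ≠ k →
        (PySem.Dict.mk ((k, v) :: t)).getD a "" = (PySem.Dict.mk t).getD a "" := by
      intro a ha
      simp [PySem.Dict.getD_eq_get?_getD, PySem.Dict.get?_mk_cons, Ne.symm ha]
    have hgetDk : (PySem.Dict.mk ((k, v) :: t)).getD k "" = v := by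
      simp [PySem.Dict.getD_eq_get?_getD, PySem.Dict.get?_mk_cons]
    have hpk : (PySem.Dict.mk t).contains k = false := by
      rw [PySem.Dict.contains_eq_isSome_get?,
        (PySem.Dict.get?_eq_none_iff_not_mem_keys _ _).2 (by exact hk_not)]
      rfl
    have hfc : L.filter (fun a => (PySem.Dict.mk ((k, v) :: t)).contains a)
        = L.filter (fun a => a == k || (PySem.Dict.mk t).contains a) :=
      List.filter_congr (fun a _ => hcont a)
    by_cases hkL : k ∈ L
    · -- the head entry is kept
      have h2 := pv_filter_or_perm L hL k hkL (fun a => (PySem.Dict.mk t).contains a) hpk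
      have h3 := h2.map (fun a => (a, (PySem.Dict.mk ((k, v) :: t)).getD a ""))
      have h4 : (L.filter (fun a => (PySem.Dict.mk t).contains a)).map
            (fun a => (a, (PySem.Dict.mk ((k, v) :: t)).getD a ""))
          = (L.filter (fun a => (PySem.Dict.mk t).contains a)).map
            (fun a => (a, (PySem.Dict.mk t).getD a "")) := by
        apply List.map_congr_left
        intro a ha
        have hpa : (PySem.Dict.mk t).contains a = true := (List.mem_filter.1 ha).2
        have hak : a ≠ k := fun h => by rw [h, hpk] at hpa; exact absurd hpa (by simp)
        rw [hgetD a hak]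
      rw [hfc]
      refine h3.trans ?_
      simp only [List.map_cons, hgetDk, h4]
      have : ((k, v) :: t).filter (fun item => decide (item.1 ∈ L))
          = (k, v) :: t.filter (fun item => decide (item.1 ∈ L)) := by
        simp [hkL]
      rw [this]
      exact (ih hl').cons (k, v)
    · -- the head entry is dropped
      have hfc2 : L.filter (fun a => a == k || (PySem.Dict.mk t).contains a)
          = L.filter (fun a => (PySem.Dict.mk t).contains a) := by
        apply List.filter_congr
        intro a ha
        have hak : a ≠ k := fun h => hkL (h ▸ ha)
        simp [hak]
      have h4 : (L.filter (fun a => (PySem.Dict.mk t).contains a)).map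
            (fun a => (a, (PySem.Dict.mk ((k, v) :: t)).getD a ""))
          = (L.filter (fun a => (PySem.Dict.mk t).contains a)).map
            (fun a => (a, (PySem.Dict.mk t).getD a "")) := by
        apply List.map_congr_left
        intro a ha
        have hpa : (PySem.Dict.mk t).contains a = true := (List.mem_filter.1 ha).2
        have hak : a ≠ k := fun h => by rw [h, hpk] at hpa; exact absurd hpa (by simp)
        rw [hgetD a hak]
      have hrhs : ((k, v) :: t).filter (fun item => decide (item.1 ∈ L))
          = t.filter (fun item => decide (item.1 ∈ L)) := by
        simp [hkL]
      rw [hfc, hfc2, h4, hrhs]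
      exact ih hl'

lemma pv_A_items (d : PySem.Dict String String) (L : List String) (hL : L.Nodup) :
    (L.foldl
        (fun (acc : PySem.Dict String String) attr =>
          match d.get? attr with
          | some v => acc.insert attr v
          | none => acc)
        PySem.Dict.empty).items
      = (L.filter (fun a => d.contains a)).map (fun a => (a, d.getD a "")) := by
  rw [PySem.List.foldl_congr_mem L _
    (fun (acc : PySem.Dict String String) a =>
      if d.contains a = true then acc.insert a (d.getD a "") else acc) _ ?_]
  · rw [PySem.List.foldl_ite_eq_foldl_filter (fun a => d.contains a = true)]
    have hfe : (L.filter (fun a => decide (d.contains a = true)))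
        = L.filter (fun a => d.contains a) := by simp
    rw [hfe]
    have := PySem.Dict.items_foldl_insert_fresh (L.filter (fun a => d.contains a))
      (fun a => a) (fun a => d.getD a "") PySem.Dict.empty
      (by intro a _; simp [PySem.Dict.contains_empty])
      (by simpa using hL.filter (fun a => d.contains a))
    simpa using this
  · intro acc a _
    cases hg : d.get? a with
    | none => simp [PySem.Dict.contains_eq_isSome_get?, hg]
    | some w => simp [PySem.Dict.contains_eq_isSome_get?, PySem.Dict.getD_eq_get?_getD, hg]

lemma pv_ofList_items (l : List (String × String)) (h : (l.map Prod.fst).Nodup) :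
    (PySem.Dict.ofList l).items = l := by
  have := PySem.Dict.items_foldl_insert_fresh l Prod.fst Prod.snd PySem.Dict.empty
    (by intro a _; simp [PySem.Dict.contains_empty]) h
  simpa using this

lemma pv_master (metadata : List (String × String)) (hnd : (metadata.map Prod.fst).Nodup)
    (L : List String) (c : Int) (hL : L.Nodup)
    (hclen : c ≤ (pvCHAIN.length : Int))
    (hchain : ∀ s ∈ pvCHAIN, ((pvRANK.getD s (pvCHAIN.length : Int) < c) ↔ s ∈ L))
    (hsub : ∀ s ∈ L, s ∈ pvCHAIN)
    (hpair : L.Pairwise (fun a b => pvRANK.getD a 0 < pvRANK.getD b 0)) :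
    (L.foldl
        (fun (d : PySem.Dict String String) attr =>
          match (PySem.Dict.mk metadata).get? attr with
          | some v => d.insert attr v
          | none => d)
        PySem.Dict.empty).items
      = (PySem.Dict.ofList (PySem.List.sorted
          ((PySem.Dict.mk metadata).items.filter
            (fun item => decide (pvRANK.getD item.1 (pvCHAIN.length : Int) < c)))
          (fun item => pvRANK.getD item.1 0) false)).items := by
  have hfil : (PySem.Dict.mk metadata).items.filter
        (fun item => decide (pvRANK.getD item.1 (pvCHAIN.length : Int) < c))
      = metadata.filter (fun item => decide (item.1 ∈ L)) := by
    show metadata.filter _ = metadata.filter _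
    apply List.filter_congr
    intro item _
    exact decide_eq_decide.2 (pv_pred_iff L c hclen hchain hsub item.1)
  have hperm := pv_perm_main metadata hnd L hL
  have hpairT : ((L.filter (fun a => (PySem.Dict.mk metadata).contains a)).map
        (fun a => (a, (PySem.Dict.mk metadata).getD a ""))).Pairwise
      (fun p q => pvRANK.getD p.1 0 < pvRANK.getD q.1 0) := by
    rw [List.pairwise_map]
    exact hpair.filter _
  have hsorted := PySem.List.sorted_eq_of_perm_of_pairwise_lt
    (metadata.filter (fun item => decide (item.1 ∈ L)))
    ((L.filter (fun a => (PySem.Dict.mk metadata).contains a)).map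
      (fun a => (a, (PySem.Dict.mk metadata).getD a "")))
    (fun item => pvRANK.getD item.1 0) hperm hpairT
  have hnodupT : (((L.filter (fun a => (PySem.Dict.mk metadata).contains a)).map
      (fun a => (a, (PySem.Dict.mk metadata).getD a ""))).map Prod.fst).Nodup := by
    rw [List.map_map]
    have hid : (Prod.fst ∘ fun a => (a, (PySem.Dict.mk metadata).getD a "")) = id := rfl
    rw [hid, List.map_id]
    exact hL.filter _
  rw [pv_A_items (PySem.Dict.mk metadata) L hL, hfil, hsorted, pv_ofList_items _ hnodupT]

-- ===== VERDICT (by name: the statement is the Claim_ definition above) =====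
theorem cut_down_to_version_py_spec : Claim_equal_cut_down_to_version_py := by
  intro metadata version _ hpre
  obtain ⟨hv, hnd⟩ := hpre
  unfold Spec_cut_down_to_version_py
  fin_cases hv
  · exact pv_master metadata hnd (pvCHAIN.take 9) 9 (by decide) (by decide) (by decide) (by decide) (by decide)
  · exact pv_master metadata hnd (pvCHAIN.take 12) 12 (by decide) (by decide) (by decide) (by decide) (by decide)
  · exact pv_master metadata hnd (pvCHAIN.take 13) 13 (by decide) (by decide) (by decide) (by decide) (by decide)
  · exact pv_master metadata hnd (pvCHAIN.take 14) 14 (by decide) (by decide) (by decide) (by decide) (by decide)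
  · exact pv_master metadata hnd (pvCHAIN.take 16) 16 (by decide) (by decide) (by decide) (by decide) (by decide)
  · exact pv_master metadata hnd (pvCHAIN.take 17) 17 (by decide) (by decide) (by decide) (by decide) (by decide)
  · exact pv_master metadata hnd (pvCHAIN.take 19) 19 (by decide) (by decide) (by decide) (by decide) (by decide)
  · exact pv_master metadata hnd (pvCHAIN.take 20) 20 (by decide) (by decide) (by decide) (by decide) (by decide)
  · rfl
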